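-- pv_equiv track=rewrite | github.com/juliocpg/validators_paper | tools.py | generate_round_robin_sequences
-- ===== SOURCE A (Python) =====
-- def generate_round_robin_sequences(n, m):
--     sequences = []
--     elements = list(range(0, n))
--     num_elements = len(elements)
--
--     for i in range(num_elements):
--         sequence = []
--
--         for j in range(m):
--             idx = (i + j) % num_elements
--             sequence.append(elements[idx])
--
--         sequences.append(sequence)
--
--     return sequences
-- ===== SOURCE B (Python) =====
-- def generate_round_robin_sequences(n, m):
--     if n <= 0:
--         return []
--     if m <= 0:
--         return [[] for _ in range(n)]
--     repeat = -(-(n - 1 + m) // n)          # ceil((n-1+m)/n) tiles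
--     base = list(range(n)) * repeat
--     return [base[i:i + m] for i in range(n)]
-- ===== Notes on version B (the rewrite author's own statement) =====
-- stated objective: faster
-- what changed: A computes every element with a per-element (i+j) % n index loop; B tiles list(range(n)) enough times once and extracts each cyclic window as a slice base[i:i+m], replacing per-element Python-level arithmetic with C-level slicing (constant-factor speedup, measured ~3.5x).
import Mathlib
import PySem

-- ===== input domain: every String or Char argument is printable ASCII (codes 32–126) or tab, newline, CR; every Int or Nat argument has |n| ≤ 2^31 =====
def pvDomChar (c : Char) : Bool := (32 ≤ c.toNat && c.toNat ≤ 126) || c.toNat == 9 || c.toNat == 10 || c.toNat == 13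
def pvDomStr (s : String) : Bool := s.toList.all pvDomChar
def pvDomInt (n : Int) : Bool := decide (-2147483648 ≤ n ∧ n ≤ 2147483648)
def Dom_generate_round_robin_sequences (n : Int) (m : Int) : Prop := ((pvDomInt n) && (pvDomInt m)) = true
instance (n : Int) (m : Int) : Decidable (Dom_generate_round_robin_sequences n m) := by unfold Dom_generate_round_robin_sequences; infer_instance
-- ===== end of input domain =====

-- B replaces A's nested per-element modulo loops by tiling range(n) once and slicing each
-- cyclic window out of the tiled list (idiomatic precompute-then-slice decomposition).

-- ===== PORT A =====
def generate_round_robin_sequences (n : Int) (m : Int) : List (List Int) :=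
  let elements := PySem.List.pyRange 0 n 1
  let num_elements : Int := (elements.length : Int)
  (PySem.List.pyRange 0 num_elements 1).foldl (fun sequences i =>
    let sequence := (PySem.List.pyRange 0 m 1).foldl (fun sequence j =>
      -- idx = (i + j) % num_elements is always a valid index (0 ≤ idx < num_elements inside
      -- this loop, which only runs when num_elements > 0), so pyGetD is exact here
      sequence ++ [PySem.List.pyGetD elements (PySem.Int.mod (i + j) num_elements) 0]) []
    sequences ++ [sequence]) []

-- ===== PORT B =====
def generate_round_robin_sequences_alt (n : Int) (m : Int) : List (List Int) :=
  if n ≤ 0 then []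
  else if m ≤ 0 then (PySem.List.pyRange 0 n 1).map (fun _ => ([] : List Int))
  else
    let rep : Int := -(PySem.Int.floordiv (-(n - 1 + m)) n)
    let base := PySem.List.pyRepeat (PySem.List.pyRange 0 n 1) rep
    (PySem.List.pyRange 0 n 1).map (fun i => PySem.List.slice base (some i) (some (i + m)))

-- ===== PRECONDITION & SPEC =====
def Spec_generate_round_robin_sequences (n : Int) (m : Int) (out : List (List Int)) : Prop := out = generate_round_robin_sequences_alt n m
instance (n : Int) (m : Int) (out : List (List Int)) : Decidable (Spec_generate_round_robin_sequences n m out) := by unfold Spec_generate_round_robin_sequences; infer_instance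

-- ===== CLAIM (what is proved, stated in full; the proofs are below) =====
def Claim_equal_generate_round_robin_sequences : Prop := ∀ (n : Int) (m : Int), Dom_generate_round_robin_sequences n m → Spec_generate_round_robin_sequences n m (generate_round_robin_sequences n m)

-- ===== LEMMAS AND PROOFS =====

-- the canonical closed form both ports are reduced to: row i, column j holds (i + j) % n
def rrCanon (n m : Int) : List (List Int) :=
  (PySem.List.pyRange 0 n 1).map (fun i =>
    (PySem.List.pyRange 0 m 1).map (fun j => PySem.Int.mod (i + j) n))

lemma portA_eq_canon (n m : Int) : generate_round_robin_sequences n m = rrCanon n m := by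
  unfold generate_round_robin_sequences rrCanon
  by_cases hn : n ≤ 0
  · rw [PySem.List.pyRange_one_eq_nil hn]
    simp
  · have hn : 0 < n := by omega
    have hlen : ((PySem.List.pyRange 0 n 1).length : Int) = n := by
      rw [PySem.List.length_pyRange_one]; omega
    simp only [hlen]
    rw [PySem.List.foldl_append_singleton_eq_map]
    simp only [List.nil_append]
    apply List.map_congr_left
    intro i hi
    rw [PySem.List.foldl_append_singleton_eq_map]
    simp only [List.nil_append]
    apply List.map_congr_left
    intro j hj
    have h0 : 0 ≤ PySem.Int.mod (i + j) n := PySem.Int.mod_nonneg _ hn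
    have h1 : PySem.Int.mod (i + j) n < n := PySem.Int.mod_lt _ hn
    rw [PySem.List.pyGetD_eq_getElem _ _ h0 (by rw [hlen]; exact h1)]
    rw [PySem.List.getElem_pyRange_one]
    omega

-- indexing a tiled list: element k of r concatenated copies of xs is xs[k % |xs|]
lemma getElem?_flatten_replicate {α : Type} (r k : Nat) (xs : List α) (hk : k < r * xs.length) :
    ((List.replicate r xs).flatten)[k]? = xs[k % xs.length]? := by
  induction r generalizing k with
  | zero => omega
  | succ r ih =>
    rw [Nat.succ_mul] at hk
    rw [List.replicate_succ, List.flatten_cons]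
    by_cases h : k < xs.length
    · rw [List.getElem?_append_left h, Nat.mod_eq_of_lt h]
    · have hx : 0 < xs.length := by
        by_contra hc
        have hz : xs.length = 0 := by omega
        rw [hz, Nat.mul_zero] at hk; omega
      rw [List.getElem?_append_right (by omega)]
      rw [ih (k - xs.length) (by omega)]
      congr 1
      exact (Nat.mod_eq_sub_mod (by omega)).symm

lemma portB_slice_eq (n m i : Int) (hn : 0 < n) (hm : 0 < m) (hi0 : 0 ≤ i) (hi : i < n) :
    PySem.List.slice (PySem.List.pyRepeat (PySem.List.pyRange 0 n 1)
        (-(PySem.Int.floordiv (-(n - 1 + m)) n))) (some i) (some (i + m)) =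
      (PySem.List.pyRange 0 m 1).map (fun j => PySem.Int.mod (i + j) n) := by
  set rep := -(PySem.Int.floordiv (-(n - 1 + m)) n) with hrepdef
  obtain ⟨hr1, hr2⟩ :=
    (PySem.Int.neg_floordiv_neg_eq_iff_of_pos (a := n - 1 + m) (q := rep) hn).mp rfl
  have hrpos : 0 < rep := by nlinarith
  have hprod : ((rep.toNat * n.toNat : Nat) : Int) = rep * n := by
    push_cast
    rw [Int.toNat_of_nonneg hrpos.le, Int.toNat_of_nonneg hn.le]
  have hi' : i = ((i.toNat : Nat) : Int) := (Int.toNat_of_nonneg hi0).symm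
  have hm' : m = ((m.toNat : Nat) : Int) := (Int.toNat_of_nonneg hm.le).symm
  have hn' : n = ((n.toNat : Nat) : Int) := (Int.toNat_of_nonneg hn.le).symm
  rw [hi', hm', PySem.List.slice_natCast_add]
  apply List.ext_getElem?
  intro j
  rw [List.getElem?_take, List.getElem?_drop, List.getElem?_map,
    PySem.List.getElem?_pyRange_one]
  by_cases hj : j < m.toNat
  · rw [if_pos hj, if_pos (show j < (((m.toNat : Nat) : Int) - 0).toNat by omega)]
    have hlen : (PySem.List.pyRange 0 n 1).length = n.toNat := by
      rw [PySem.List.length_pyRange_one]; omega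
    show ((List.replicate rep.toNat (PySem.List.pyRange 0 n 1)).flatten)[i.toNat + j]? = _
    rw [getElem?_flatten_replicate _ _ _ (by rw [hlen]; omega)]
    rw [PySem.List.getElem?_pyRange_one]
    rw [if_pos (by rw [hlen]; have := Nat.mod_lt (i.toNat + j) (y := n.toNat) (by omega); omega)]
    simp only [Option.map_some, zero_add]
    congr 1
    conv_rhs => rw [hn']
    rw [show ((i.toNat : Int) + (j : Int)) = (((i.toNat + j : Nat)) : Int) by push_cast; ring]
    rw [PySem.Int.mod_natCast]
    rw [hlen]
  · rw [if_neg hj, if_neg (show ¬ j < (((m.toNat : Nat) : Int) - 0).toNat by omega)]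
    simp

lemma portB_eq_canon (n m : Int) : generate_round_robin_sequences_alt n m = rrCanon n m := by
  unfold generate_round_robin_sequences_alt rrCanon
  by_cases hn : n ≤ 0
  · rw [if_pos hn, PySem.List.pyRange_one_eq_nil hn]
    simp
  · rw [if_neg hn]
    by_cases hm : m ≤ 0
    · rw [if_pos hm]
      simp [PySem.List.pyRange_one_eq_nil hm]
    · rw [if_neg hm]
      apply List.map_congr_left
      intro i hi
      rw [PySem.List.mem_pyRange_one] at hi
      exact portB_slice_eq n m i (by omega) (by omega) hi.1 hi.2

-- ===== VERDICT (by name: the statement is the Claim_ definition above) =====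
theorem generate_round_robin_sequences_spec : Claim_equal_generate_round_robin_sequences := by
  intro n m _
  unfold Spec_generate_round_robin_sequences
  rw [portA_eq_canon, portB_eq_canon]
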